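-- pv_equiv track=rewrite | github.com/TyGuS/suslik | evolutionary.py | n_0s_in_a_row_aux
-- ===== SOURCE A (Python) =====
-- def n_0s_in_a_row_aux(n: int, acc: int, ranks):
--     length = len(ranks)
--     if length == 0:
--         return False
--     elif n == acc:
--         return True
--     elif (n > acc) and (ranks[0] != 0):
--         ranks.pop(0)
--         return n_0s_in_a_row_aux(n, 0, ranks)
--     elif (n > acc) and (ranks[0] == 0):
--         ranks.pop(0)
--         return n_0s_in_a_row_aux(n, acc + 1, ranks)
--     else:
--         return False
-- ===== SOURCE B (Python) =====
-- def n_0s_in_a_row_aux(n: int, acc: int, ranks):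
--     # Single non-mutating pass instead of recursion with ranks.pop(0);
--     # equivalence is about the return value only (B does not mutate ranks).
--     run = acc
--     for r in ranks:
--         if run == n:
--             return True
--         if run > n:
--             return False
--         run = run + 1 if r == 0 else 0
--     return False
-- ===== Notes on version B (the rewrite author's own statement) =====
-- stated objective: simpler
-- what changed: Replaced the recursion that mutates ranks via pop(0) with a single non-mutating forward scan maintaining the zero-run counter (return values agree everywhere; B does not mutate ranks).
import Mathlib
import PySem

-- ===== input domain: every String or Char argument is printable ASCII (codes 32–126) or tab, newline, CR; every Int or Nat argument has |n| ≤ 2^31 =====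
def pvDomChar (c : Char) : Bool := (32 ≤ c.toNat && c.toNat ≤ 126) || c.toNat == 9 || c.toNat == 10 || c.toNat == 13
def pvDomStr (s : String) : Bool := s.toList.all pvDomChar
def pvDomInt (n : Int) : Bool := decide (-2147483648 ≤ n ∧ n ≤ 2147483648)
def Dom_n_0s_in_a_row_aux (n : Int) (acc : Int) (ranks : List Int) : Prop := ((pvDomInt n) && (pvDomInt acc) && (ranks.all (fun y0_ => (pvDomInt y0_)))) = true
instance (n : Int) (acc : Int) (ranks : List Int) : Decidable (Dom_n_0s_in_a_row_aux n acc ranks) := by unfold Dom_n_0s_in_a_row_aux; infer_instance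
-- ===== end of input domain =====

-- B: a single non-mutating forward scan with a run counter instead of A's recursion with ranks.pop(0); equivalence is about the RETURN value only (A mutates ranks in place, B does not).
-- ===== PORT A =====
def n_0s_in_a_row_aux (n : Int) (acc : Int) (ranks : List Int) : Bool :=
  match ranks with
  | [] => false            -- length == 0
  | h :: t =>
    if n == acc then true
    else if n > acc && h != 0 then n_0s_in_a_row_aux n 0 t        -- ranks.pop(0)
    else if n > acc && h == 0 then n_0s_in_a_row_aux n (acc + 1) t
    else false

-- ===== PORT B =====
def altGo (n : Int) (run : Int) : List Int → Bool
  | [] => false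
  | r :: rest =>
    if run == n then true
    else if run > n then false
    else altGo n (if r == 0 then run + 1 else 0) rest

def n_0s_in_a_row_aux_alt (n : Int) (acc : Int) (ranks : List Int) : Bool :=
  altGo n acc ranks

-- ===== PRECONDITION & SPEC =====
def Spec_n_0s_in_a_row_aux (n : Int) (acc : Int) (ranks : List Int) (out : Bool) : Prop := out = n_0s_in_a_row_aux_alt n acc ranks
instance (n : Int) (acc : Int) (ranks : List Int) (out : Bool) : Decidable (Spec_n_0s_in_a_row_aux n acc ranks out) := by unfold Spec_n_0s_in_a_row_aux; infer_instance

-- ===== CLAIM (what is proved, stated in full; the proofs are below) =====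
def Claim_equal_n_0s_in_a_row_aux : Prop := ∀ (n : Int) (acc : Int) (ranks : List Int), Dom_n_0s_in_a_row_aux n acc ranks → Spec_n_0s_in_a_row_aux n acc ranks (n_0s_in_a_row_aux n acc ranks)

-- ===== LEMMAS AND PROOFS =====

-- ===== VERDICT (by name: the statement is the Claim_ definition above) =====
theorem agree (n : Int) (ranks : List Int) : ∀ acc : Int, n_0s_in_a_row_aux n acc ranks = altGo n acc ranks := by
  induction ranks with
  | nil => intro acc; rfl
  | cons h t ih =>
    intro acc
    simp only [n_0s_in_a_row_aux, altGo]
    by_cases he : n = acc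
    · simp [he]
    · have hne : (n == acc) = false := by simp [he]
      rw [hne]
      have he' : ¬ acc = n := fun h => he h.symm
      by_cases hgt : n > acc
      · have : (acc > n) = False := by simp; omega
        simp only [this, if_false]
        by_cases hz : h = 0
        · simp [hz, hgt, ih, he']
        · simp [hz, hgt, ih, he']
      · have hlt : acc > n := by omega
        simp [hgt, hlt, he']

theorem n_0s_in_a_row_aux_spec : Claim_equal_n_0s_in_a_row_aux := by
  intro n acc ranks _
  unfold Spec_n_0s_in_a_row_aux n_0s_in_a_row_aux_alt
  exact agree n ranks acc
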